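-- pv_equiv track=rewrite | github.com/eronyako/PassDict | PassDict.py | pw_convert
-- ===== SOURCE A (Python) =====
-- def pw_convert(password_list: list[str]) -> list[str]:
--     pw_out = set()
--     for password in password_list:
--         if password == '\n':
--             continue
--         pw_out.add(password)
--     pw_out = sorted(pw_out)
--     return pw_out
-- ===== SOURCE B (Python) =====
-- def pw_convert(password_list: list[str]) -> list[str]:
--     kept = sorted(p for p in password_list if p != '\n')
--     out = []
--     for p in kept:
--         if not out or out[-1] != p:
--             out.append(p)
--     return out
-- ===== Notes on version B (the rewrite author's own statement) =====
-- stated objective: alternative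
-- what changed: B keeps duplicates, sorts the filtered list, and removes adjacent duplicates in one linear scan, maintaining no set at all (sort-then-dedup-adjacent instead of A's set-then-sort).
import Mathlib
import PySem

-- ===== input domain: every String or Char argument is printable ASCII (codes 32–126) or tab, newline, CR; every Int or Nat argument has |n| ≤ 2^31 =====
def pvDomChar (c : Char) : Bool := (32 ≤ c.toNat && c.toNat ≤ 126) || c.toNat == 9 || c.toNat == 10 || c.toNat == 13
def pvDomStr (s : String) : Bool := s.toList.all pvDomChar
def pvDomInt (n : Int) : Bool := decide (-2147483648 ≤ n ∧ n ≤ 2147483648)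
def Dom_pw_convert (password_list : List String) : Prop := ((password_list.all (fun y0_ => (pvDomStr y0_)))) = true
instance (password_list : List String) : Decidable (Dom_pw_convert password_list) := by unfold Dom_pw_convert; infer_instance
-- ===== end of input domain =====

-- B removes the set: it sorts the filtered list (duplicates kept) and drops adjacent duplicates in one scan; same output, alternative data structure.

-- ===== PORT A =====
def pw_convert (password_list : List String) : List String :=
  let pw_out : PySem.Set String :=
    password_list.foldl (fun pw_out password =>
      if password = "\n" then pw_out else PySem.Set.add pw_out password) PySem.Set.empty
  PySem.List.sorted pw_out (fun x => x) false

-- ===== PORT B =====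
def pw_convert_alt (password_list : List String) : List String :=
  let kept := PySem.List.sorted (password_list.filter (fun p => p ≠ "\n")) (fun x => x) false
  kept.foldl (fun out p =>
    if out = [] ∨ out.getLast? ≠ some p then out ++ [p] else out) []

-- ===== PRECONDITION & SPEC =====
def Spec_pw_convert (password_list : List String) (out : List String) : Prop := out = pw_convert_alt password_list
instance (password_list : List String) (out : List String) : Decidable (Spec_pw_convert password_list out) := by unfold Spec_pw_convert; infer_instance

-- ===== CLAIM (what is proved, stated in full; the proofs are below) =====
def Claim_equal_pw_convert : Prop := ∀ (password_list : List String), Dom_pw_convert password_list → Spec_pw_convert password_list (pw_convert password_list)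

-- ===== LEMMAS AND PROOFS =====

-- A's loop builds set(filter(...)).
theorem foldlA_eq_ofList (xs : List String) (s : List String) :
    xs.foldl (fun pw_out password =>
      if password = "\n" then pw_out else PySem.Set.add pw_out password) s
      = (xs.filter (fun p => p ≠ "\n")).foldl PySem.Set.add s := by
  induction xs generalizing s with
  | nil => rfl
  | cons a t ih =>
      by_cases h : a = "\n" <;> simp [List.foldl, List.filter, h, ih]

-- Invariant for B's dedup scan: it stays strictly increasing and collects exactly the members.
theorem foldlB_inv (s : List String) : ∀ (acc : List String),
    acc.Pairwise (· < ·) → s.Pairwise (· ≤ ·) →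
    (∀ a ∈ acc, ∀ b ∈ s, a < b ∨ (a = b ∧ acc.getLast? = some a)) →
    (s.foldl (fun out p =>
        if out = [] ∨ out.getLast? ≠ some p then out ++ [p] else out) acc).Pairwise (· < ·) ∧
    ∀ x, x ∈ s.foldl (fun out p =>
        if out = [] ∨ out.getLast? ≠ some p then out ++ [p] else out) acc ↔ x ∈ acc ∨ x ∈ s := by
  induction s with
  | nil => intro acc h1 _ _; exact ⟨h1, fun x => by simp⟩
  | cons p t ih =>
      intro acc h1 h2 h3
      by_cases hc : acc = [] ∨ acc.getLast? ≠ some p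
      · -- append p
        have hap : ∀ a ∈ acc, a < p := by
          intro a ha
          rcases h3 a ha p (by simp) with h | ⟨rfl, hl⟩
          · exact h
          · rcases hc with hc | hc
            · simp [hc] at hl
            · exact absurd hl hc
        have h1' : (acc ++ [p]).Pairwise (· < ·) := by
          rw [List.pairwise_append]
          exact ⟨h1, List.pairwise_singleton _ _, by simpa using hap⟩
        have h3' : ∀ a ∈ acc ++ [p], ∀ b ∈ t, a < b ∨ (a = b ∧ (acc ++ [p]).getLast? = some a) := by
          intro a ha b hb
          have hpb : p ≤ b := (List.pairwise_cons.mp h2).1 b hb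
          rcases List.mem_append.mp ha with ha | ha
          · exact Or.inl (lt_of_lt_of_le (hap a ha) hpb)
          · simp only [List.mem_singleton] at ha; subst ha
            rcases lt_or_eq_of_le hpb with h | h
            · exact Or.inl h
            · exact Or.inr ⟨h, by simp⟩
        obtain ⟨g1, g2⟩ := ih (acc ++ [p]) h1' (List.pairwise_cons.mp h2).2 h3'
        refine ⟨by simpa [List.foldl, hc] using g1, fun x => ?_⟩
        have := g2 x
        simp only [List.foldl, if_pos hc] at *
        rw [this]; simp [or_assoc, or_comm, or_left_comm]
      · -- skip p : then acc.getLast? = some p, so p ∈ acc already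
        push Not at hc
        obtain ⟨hne, hlast⟩ := hc
        have hpmem : p ∈ acc := List.mem_of_getLast? hlast
        have h3' : ∀ a ∈ acc, ∀ b ∈ t, a < b ∨ (a = b ∧ acc.getLast? = some a) := by
          intro a ha b hb
          have hpb : p ≤ b := (List.pairwise_cons.mp h2).1 b hb
          rcases h3 a ha p (by simp) with h | ⟨rfl, hl⟩
          · exact Or.inl (lt_of_lt_of_le h hpb)
          · rcases lt_or_eq_of_le hpb with h | h
            · exact Or.inl h
            · exact Or.inr ⟨h, hl⟩
        obtain ⟨g1, g2⟩ := ih acc h1 (List.pairwise_cons.mp h2).2 h3'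
        have hif : ¬(acc = [] ∨ acc.getLast? ≠ some p) := by
          push Not; exact ⟨hne, hlast⟩
        refine ⟨by simpa [List.foldl, hif] using g1, fun x => ?_⟩
        have := g2 x
        simp only [List.foldl, if_neg hif] at *
        rw [this]
        simp only [List.mem_cons]
        constructor
        · rintro (h | h)
          · exact Or.inl h
          · exact Or.inr (Or.inr h)
        · rintro (h | rfl | h)
          · exact Or.inl h
          · exact Or.inl hpmem
          · exact Or.inr h

-- Core: dedup-adjacent over sorted(l) equals sorted(set(l)).
theorem dedup_sorted_eq (l : List String) :
    PySem.List.sorted (PySem.Set.ofList l) (fun x => x) false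
      = (PySem.List.sorted l (fun x => x) false).foldl (fun out p =>
          if out = [] ∨ out.getLast? ≠ some p then out ++ [p] else out) [] := by
  set s := PySem.List.sorted l (fun x => x) false with hs
  have hps : s.Pairwise (· ≤ ·) := by
    have := PySem.List.sorted_pairwise (xs := l) (key := fun x => x)
    simpa [hs] using this
  obtain ⟨g1, g2⟩ := foldlB_inv s [] (by simp) hps (by simp)
  set d := s.foldl (fun out p =>
      if out = [] ∨ out.getLast? ≠ some p then out ++ [p] else out) [] with hd
  have hmem : ∀ x, x ∈ d ↔ x ∈ PySem.Set.ofList l := by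
    intro x
    rw [g2 x]
    simp [PySem.Set.mem_ofList, hs, PySem.List.mem_sorted]
  have hnd : d.Nodup := g1.imp ne_of_lt
  have hperm : d.Perm (PySem.Set.ofList l) :=
    (List.perm_ext_iff_of_nodup hnd (PySem.Set.nodup_ofList l)).mpr hmem
  exact PySem.List.sorted_eq_of_perm_of_pairwise_lt _ d (fun x => x) hperm g1

-- ===== VERDICT (by name: the statement is the Claim_ definition above) =====
theorem pw_convert_spec : Claim_equal_pw_convert := by
  intro password_list _
  unfold Spec_pw_convert pw_convert pw_convert_alt
  rw [foldlA_eq_ofList]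
  have : (password_list.filter (fun p => p ≠ "\n")).foldl PySem.Set.add PySem.Set.empty
      = PySem.Set.ofList (password_list.filter (fun p => p ≠ "\n")) :=
    (PySem.Set.ofList_eq_foldl _).symm
  rw [this, dedup_sorted_eq]
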